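-- pv_equiv track=rewrite | github.com/zhao56164394/qiankun-three-lines-v8 | analysis/test65_gen_sell_research.py | find_mf_neg
-- ===== SOURCE A (Python) =====
-- def find_mf_neg(mf_seg, was_pos_thresh=50):
--     """主力线由 ≥+50 转 <0"""
--     n = len(mf_seg)
--     was_pos = False
--     for k in range(n):
--         if mf_seg[k] >= was_pos_thresh:
--             was_pos = True
--         elif was_pos and mf_seg[k] < 0:
--             return k
--     return n - 1
-- ===== SOURCE B (Python) =====
-- def find_mf_neg(mf_seg, was_pos_thresh=50):
--     """主力线由 ≥+50 转 <0 (prefix-maximum staging instead of a sticky flag)"""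
--     # Stage 1: pmax[k] = max(mf_seg[:k]) (None for the empty prefix)
--     pmax = []
--     m = None
--     for v in mf_seg:
--         pmax.append(m)
--         m = v if m is None or v > m else m
--     # Stage 2: first index whose strict-prefix max reached the threshold
--     # while the element itself is negative (and below the threshold)
--     for k, (p, v) in enumerate(zip(pmax, mf_seg)):
--         if p is not None and p >= was_pos_thresh and v < 0 and v < was_pos_thresh:
--             return k
--     return len(mf_seg) - 1
-- ===== Notes on version B (the rewrite author's own statement) =====
-- stated objective: alternative
-- what changed: Replaced the sticky boolean flag single pass by a two-stage pipeline that first materialises the running maximum of each strict prefix and then searches the zipped (prefix-max, value) pairs for the first index whose prefix max reached the threshold while the value is negative.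
import Mathlib
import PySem

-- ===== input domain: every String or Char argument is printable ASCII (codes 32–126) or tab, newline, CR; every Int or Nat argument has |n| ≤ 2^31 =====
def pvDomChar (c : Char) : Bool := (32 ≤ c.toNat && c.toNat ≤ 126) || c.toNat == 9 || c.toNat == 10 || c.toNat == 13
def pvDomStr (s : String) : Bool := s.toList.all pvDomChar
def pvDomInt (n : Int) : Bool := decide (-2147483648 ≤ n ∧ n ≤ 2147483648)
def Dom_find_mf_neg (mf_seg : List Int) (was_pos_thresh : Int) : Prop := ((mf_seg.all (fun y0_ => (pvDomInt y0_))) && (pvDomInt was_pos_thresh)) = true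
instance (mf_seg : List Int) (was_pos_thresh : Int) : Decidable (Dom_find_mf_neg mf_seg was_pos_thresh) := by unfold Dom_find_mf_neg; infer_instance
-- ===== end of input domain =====

-- B replaces A's sticky-flag single pass by a two-stage prefix-maximum pipeline (same cost, alternative structure).


-- ===== PORT A =====
-- A's loop over k with the sticky flag `was_pos`; `some k` models the early `return k`.
def pvA_go (thresh : Int) : List Int → Nat → Bool → Option Nat
  | [], _, _ => none
  | v :: rest, k, was_pos =>
    if thresh ≤ v then pvA_go thresh rest (k + 1) true
    else if was_pos ∧ v < 0 then some k
    else pvA_go thresh rest (k + 1) was_pos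

def find_mf_neg (mf_seg : List Int) (was_pos_thresh : Int) : Int :=
  match pvA_go was_pos_thresh mf_seg 0 false with
  | some k => (k : Int)
  | none => (mf_seg.length : Int) - 1

-- ===== PORT B =====
-- m = v if m is None or v > m else m
def pvPmaxStep (m : Option Int) (v : Int) : Option Int :=
  match m with
  | none => some v
  | some x => if x < v then some v else some x

-- Stage 1 of Source B: the list of (strict-prefix max, value) pairs (pmax zipped with mf_seg).
def pvPmax : List Int → Option Int → List (Option Int × Int)
  | [], _ => []
  | v :: rest, m => (m, v) :: pvPmax rest (pvPmaxStep m v)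

-- the if-condition of Stage 2: p is not None and p >= thresh and v < 0 and v < thresh
def pvHit (thresh : Int) (pv : Option Int × Int) : Bool :=
  match pv.1 with
  | none => false
  | some p => decide (thresh ≤ p ∧ pv.2 < 0 ∧ pv.2 < thresh)

def find_mf_neg_alt (mf_seg : List Int) (was_pos_thresh : Int) : Int :=
  match (pvPmax mf_seg none).findIdx? (pvHit was_pos_thresh) with
  | some k => (k : Int)
  | none => (mf_seg.length : Int) - 1

-- ===== PRECONDITION & SPEC =====
def Spec_find_mf_neg (mf_seg : List Int) (was_pos_thresh : Int) (out : Int) : Prop := out = find_mf_neg_alt mf_seg was_pos_thresh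
instance (mf_seg : List Int) (was_pos_thresh : Int) (out : Int) : Decidable (Spec_find_mf_neg mf_seg was_pos_thresh out) := by unfold Spec_find_mf_neg; infer_instance

-- ===== CLAIM (what is proved, stated in full; the proofs are below) =====
def Claim_equal_find_mf_neg : Prop := ∀ (mf_seg : List Int) (was_pos_thresh : Int), Dom_find_mf_neg mf_seg was_pos_thresh → Spec_find_mf_neg mf_seg was_pos_thresh (find_mf_neg mf_seg was_pos_thresh)

-- ===== LEMMAS AND PROOFS =====

-- A's sticky flag is exactly "the strict-prefix maximum has reached the threshold".
def pvHot (thresh : Int) : Option Int → Bool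
  | none => false
  | some x => decide (thresh ≤ x)

theorem pvA_eq_pmax (thresh : Int) (l : List Int) (k : Nat) (m : Option Int) :
    pvA_go thresh l k (pvHot thresh m) =
      ((pvPmax l m).findIdx? (pvHit thresh)).map (fun j => k + j) := by
  induction l generalizing k m with
  | nil => simp [pvA_go, pvPmax]
  | cons v rest ih =>
    by_cases hv : thresh ≤ v
    · have hh : pvHit thresh (m, v) = false := by
        cases m <;> simp [pvHit] <;> omega
      have hhot : pvHot thresh (pvPmaxStep m v) = true := by
        cases m with
        | none => simp [pvPmaxStep, pvHot]; omega
        | some x => simp only [pvPmaxStep]; split <;> simp [pvHot] <;> omega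
      simp only [pvA_go, if_pos hv]
      rw [← hhot, ih]
      simp only [pvPmax, List.findIdx?_cons, hh, Bool.false_eq_true, if_false, Option.map_map]
      congr 1; funext j; simp only [Function.comp_apply]; omega
    · by_cases hret : pvHot thresh m = true ∧ v < 0
      · have hh : pvHit thresh (m, v) = true := by
          cases m with
          | none => simp [pvHot] at hret
          | some x =>
            simp only [pvHot, decide_eq_true_eq] at hret
            simp only [pvHit, decide_eq_true_eq]
            exact ⟨hret.1, hret.2, by omega⟩
        simp [pvA_go, if_neg hv, hret.1, hret.2, pvPmax, List.findIdx?_cons, hh]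
      · have hh : pvHit thresh (m, v) = false := by
          cases m with
          | none => simp [pvHit]
          | some x =>
            simp only [pvHot, decide_eq_true_eq, not_and] at hret
            simp only [pvHit, decide_eq_false_iff_not, not_and]
            intro hp hneg; exact absurd (hret hp) (by omega)
        have hkeep : pvHot thresh (pvPmaxStep m v) = pvHot thresh m := by
          cases m with
          | none => simp [pvPmaxStep, pvHot]; omega
          | some x => simp only [pvPmaxStep]; split <;> simp [pvHot] <;> omega
        have hstep : pvA_go thresh (v :: rest) k (pvHot thresh m) =
            pvA_go thresh rest (k + 1) (pvHot thresh m) := by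
          cases hcase : pvHot thresh m with
          | false => simp [pvA_go, if_neg hv]
          | true =>
            have : ¬ v < 0 := fun hneg => hret ⟨hcase, hneg⟩
            simp [pvA_go, this]
        rw [hstep, ← hkeep, ih]
        simp only [pvPmax, List.findIdx?_cons, hh, Bool.false_eq_true, if_false,
          Option.map_map]
        congr 1; funext j; simp only [Function.comp_apply]; omega

-- ===== VERDICT (by name: the statement is the Claim_ definition above) =====
theorem find_mf_neg_spec : Claim_equal_find_mf_neg := by
  intro mf_seg th _hd
  show _ = _
  unfold find_mf_neg find_mf_neg_alt
  have h := pvA_eq_pmax th mf_seg 0 none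
  simp only [pvHot] at h
  rw [h]
  cases hfi : (pvPmax mf_seg none).findIdx? (pvHit th) with
  | none => rfl
  | some k => simp
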